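-- pv_equiv track=rewrite | github.com/explosion/spacy-transformers | spacy_transformers/types.py | transpose_list
-- ===== SOURCE A (Python) =====
-- def transpose_list(nested_list):
--     output = []
--     for i, entry in enumerate(nested_list):
--         while len(output) < len(entry):
--             output.append([None] * len(nested_list))
--         for j, x in enumerate(entry):
--             output[j][i] = x
--     return output
-- ===== SOURCE B (Python) =====
-- def transpose_list(nested_list):
--     width = max(map(len, nested_list), default=0)
--     padded = [row + [None] * (width - len(row)) for row in nested_list]
--     return [list(col) for col in zip(*padded)]
-- ===== Notes on version B (the rewrite author's own statement) =====
-- stated objective: alternative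
-- what changed: B works in staged passes -- compute the maximum row length, pad every row with None to a full rectangle, then transpose the rectangle with built-in zip -- instead of A's single pass that grows the output column buffer on demand and assigns each cell by index.
import Mathlib
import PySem

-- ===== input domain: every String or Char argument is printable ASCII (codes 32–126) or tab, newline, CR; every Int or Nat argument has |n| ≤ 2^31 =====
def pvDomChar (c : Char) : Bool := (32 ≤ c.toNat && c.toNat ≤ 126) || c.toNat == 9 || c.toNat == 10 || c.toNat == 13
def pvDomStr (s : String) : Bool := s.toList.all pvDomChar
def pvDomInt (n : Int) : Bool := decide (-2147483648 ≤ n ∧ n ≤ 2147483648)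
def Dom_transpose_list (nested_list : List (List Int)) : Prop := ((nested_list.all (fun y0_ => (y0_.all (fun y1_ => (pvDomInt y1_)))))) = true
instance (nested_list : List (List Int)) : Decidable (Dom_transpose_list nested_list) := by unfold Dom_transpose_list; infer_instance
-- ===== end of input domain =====

-- B builds the transpose in staged passes — max row length, pad every row with None
-- to a rectangle, then zip-transpose the rectangle — instead of A's single pass that
-- grows the output buffer on demand and assigns each cell by index (alternative).

-- ===== PORT A =====
-- the `while len(output) < len(entry): output.append([None] * len(nested_list))` loop
def padOut (output : List (List (Option Int))) (target n : Nat) : List (List (Option Int)) :=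
  if output.length < target then padOut (output ++ [List.replicate n none]) target n else output
  termination_by target - output.length
  decreasing_by simp; omega

-- the `for j, x in enumerate(entry): output[j][i] = x` loop (j carried explicitly)
def placeRow (i : Nat) : List (List (Option Int)) → Nat → List Int → List (List (Option Int))
  | out, _, [] => out
  | out, j, x :: xs => placeRow i (out.modify j (fun row => row.set i (some x))) (j + 1) xs

-- the outer `for i, entry in enumerate(nested_list)` loop (i carried explicitly; n = len(nested_list))
def goA (n : Nat) : List (List Int) → Nat → List (List (Option Int)) → List (List (Option Int))
  | [], _, out => out
  | entry :: rest, i, out => goA n rest (i + 1) (placeRow i (padOut out entry.length n) 0 entry)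

def transpose_list (nested_list : List (List Int)) : List (List (Option Int)) :=
  goA nested_list.length nested_list 0 []

-- ===== PORT B =====
-- `max(map(len, nested_list), default=0)` (lengths are ≥ 0, so folding max from 0 is exact)
def maxWidth (rows : List (List Int)) : Nat := (rows.map List.length).foldl max 0

-- `row + [None] * (width - len(row))`
def padRow (w : Nat) (r : List Int) : List (Option Int) :=
  r.map some ++ List.replicate (w - r.length) none

-- termination helpers for zipRect (the recursion consumes one element of every row)
theorem tails_sum_le {α : Type} (rows : List (List α)) :
    ((rows.map List.tail).map List.length).sum ≤ (rows.map List.length).sum := by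
  induction rows with
  | nil => simp
  | cons r rs ih =>
    have : r.tail.length ≤ r.length := by cases r <;> simp
    simp only [List.map_cons, List.sum_cons]
    omega

theorem tails_sum_lt {α : Type} (rows : List (List α)) (h : rows.all List.isEmpty = false) :
    ((rows.map List.tail).map List.length).sum < (rows.map List.length).sum := by
  induction rows with
  | nil => simp at h
  | cons r rs ih =>
    simp only [List.all_cons, Bool.and_eq_false_iff] at h
    simp only [List.map_cons, List.sum_cons]
    rcases h with h | h
    · have hr : r.tail.length < r.length := by
        cases r with
        | nil => simp at h
        | cons a as => simp
      have := tails_sum_le rs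
      omega
    · have := ih h
      have : r.tail.length ≤ r.length := by cases r <;> simp
      omega

-- `zip(*padded)`: stops at the shortest row (`zip()` with no rows yields nothing)
def zipRect (rows : List (List (Option Int))) : List (List (Option Int)) :=
  if rows.isEmpty || rows.any List.isEmpty then []
  else (rows.map (fun r => r.headD none)) :: zipRect (rows.map List.tail)
  termination_by (rows.map List.length).sum
  decreasing_by
    have h' : rows.all List.isEmpty = false := by
      rename_i h
      cases rows with
      | nil => simp at h
      | cons r rs => simp_all
    simpa using tails_sum_lt rows h'

def transpose_list_alt (nested_list : List (List Int)) : List (List (Option Int)) :=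
  zipRect (nested_list.map (padRow (maxWidth nested_list)))

-- ===== PRECONDITION & SPEC =====
def Spec_transpose_list (nested_list : List (List Int)) (out : List (List (Option Int))) : Prop := out = transpose_list_alt nested_list
instance (nested_list : List (List Int)) (out : List (List (Option Int))) : Decidable (Spec_transpose_list nested_list out) := by unfold Spec_transpose_list; infer_instance

-- ===== CLAIM (what is proved, stated in full; the proofs are below) =====
def Claim_equal_transpose_list : Prop := ∀ (nested_list : List (List Int)), Dom_transpose_list nested_list → Spec_transpose_list nested_list (transpose_list nested_list)

-- ===== LEMMAS AND PROOFS =====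

-- the common target: column j of the padded transpose, for j < maxLen
def maxLen (rows : List (List Int)) : Nat := rows.foldr (fun r m => max r.length m) 0

def cellT (rows : List (List Int)) (i j : Nat) : Option Int := ((rows[i]?).getD [])[j]?

def rowT (rows : List (List Int)) (n j : Nat) : List (Option Int) :=
  (List.range n).map (fun i => cellT rows i j)

def T (rows : List (List Int)) (n : Nat) : List (List (Option Int)) :=
  (List.range (maxLen rows)).map (fun j => rowT rows n j)

theorem maxLen_append_single (p : List (List Int)) (e : List Int) :
    maxLen (p ++ [e]) = max (maxLen p) e.length := by
  induction p with
  | nil => simp [maxLen]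
  | cons r rs ih =>
    simp only [List.cons_append, maxLen, List.foldr] at ih ⊢
    omega

theorem cell_len_le (rows : List (List Int)) (i : Nat) :
    ((rows[i]?).getD []).length ≤ maxLen rows := by
  induction rows generalizing i with
  | nil => simp [maxLen]
  | cons r rs ih =>
    cases i with
    | zero =>
      simp only [List.getElem?_cons_zero, Option.getD_some, maxLen, List.foldr]
      omega
    | succ k =>
      have := ih k
      simp only [List.getElem?_cons_succ, maxLen, List.foldr] at this ⊢
      omega

theorem T_getElem? (rows : List (List Int)) (n j : Nat) :
    (T rows n)[j]? = if j < maxLen rows then some (rowT rows n j) else none := by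
  by_cases h : j < maxLen rows
  · rw [T, List.getElem?_map, List.getElem?_range h]
    simp [h]
  · rw [T, List.getElem?_map,
        List.getElem?_eq_none (l := List.range (maxLen rows))
          (by simpa using Nat.le_of_not_lt h)]
    simp [h]

theorem padOut_eq (output : List (List (Option Int))) (target n : Nat) :
    padOut output target n = output ++ List.replicate (target - output.length) (List.replicate n none) := by
  fun_induction padOut output target n with
  | case1 out h ih =>
    rw [ih]
    have h0 : target - out.length = (target - (out.length + 1)) + 1 := by omega
    rw [List.append_assoc, h0, List.replicate_succ]
    simp
  | case2 out h =>
    have h0 : target - out.length = 0 := by omega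
    rw [h0]
    simp

theorem placeRow_getElem? (i : Nat) (e : List Int) :
    ∀ (out : List (List (Option Int))) (j0 k : Nat),
    (placeRow i out j0 e)[k]? =
      match (if j0 ≤ k then e[k - j0]? else none) with
      | some x => (out[k]?).map (fun row => row.set i (some x))
      | none => out[k]? := by
  induction e with
  | nil => intro out j0 k; simp [placeRow]
  | cons x xs ih =>
    intro out j0 k
    simp only [placeRow]
    rw [ih]
    by_cases hk : j0 ≤ k
    · by_cases he : j0 = k
      · subst he
        have h1 : ¬ (j0 + 1 ≤ j0) := by omega
        simp only [h1, if_pos (Nat.le_refl j0), Nat.sub_self,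
          List.getElem?_cons_zero, List.getElem?_modify]
        cases out[j0]? <;> simp
      · have h2 : j0 + 1 ≤ k := by omega
        have h3 : k - j0 = (k - (j0 + 1)) + 1 := by omega
        simp only [h2, if_pos, hk, h3, List.getElem?_cons_succ]
        have hm : (out.modify j0 (fun row => row.set i (some x)))[k]? = out[k]? := by
          rw [List.getElem?_modify]
          cases out[k]? <;> simp [he]
        rw [hm]
    · have h1 : ¬ (j0 + 1 ≤ k) := by omega
      have h2 : j0 ≠ k := by omega
      simp only [hk, h1, if_false]
      rw [List.getElem?_modify]
      cases out[k]? <;> simp [h2]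

-- a blank appended column equals the spec row once j is beyond every processed row
theorem rowT_blank (p : List (List Int)) (n j : Nat) (h : maxLen p ≤ j) :
    List.replicate n (none : Option Int) = rowT p n j := by
  apply List.ext_getElem?
  intro i
  simp only [rowT, List.getElem?_replicate, List.getElem?_map]
  by_cases hi : i < n
  · rw [List.getElem?_range hi]
    have := cell_len_le p i
    simp only [hi, if_pos, Option.map_some, cellT]
    rw [List.getElem?_eq_none (by omega)]
  · rw [List.getElem?_eq_none (l := List.range n) (by simpa using Nat.le_of_not_lt hi)]
    simp [hi]

theorem step_eq (p : List (List Int)) (e : List Int) (n : Nat) (hp : p.length < n) :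
    placeRow p.length (padOut (T p n) e.length n) 0 e = T (p ++ [e]) n := by
  apply List.ext_getElem?
  intro k
  rw [placeRow_getElem?, padOut_eq]
  have hlen : (T p n).length = maxLen p := by simp [T]
  have hpad : ∀ (j : Nat), (T p n ++ List.replicate (e.length - (T p n).length) (List.replicate n none))[j]? =
      if j < max (maxLen p) e.length then some (rowT p n j) else none := by
    intro j
    by_cases hj : j < maxLen p
    · rw [List.getElem?_append_left (by omega), T_getElem?]
      simp [hj]
    · rw [List.getElem?_append_right (by omega), List.getElem?_replicate, hlen]
      by_cases hj2 : j < max (maxLen p) e.length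
      · have : j - maxLen p < e.length - maxLen p := by omega
        simp [this, hj2, rowT_blank p n j (by omega)]
      · have : ¬ (j - maxLen p < e.length - maxLen p) := by omega
        simp [this, hj2]
  rw [T_getElem?, maxLen_append_single]
  simp only [Nat.zero_le, if_pos, Nat.sub_zero]
  by_cases hke : k < e.length
  · rw [List.getElem?_eq_getElem hke]
    simp only []
    rw [hpad k]
    have hkm : k < max (maxLen p) e.length := by omega
    simp only [hkm, if_pos, Option.map_some]
    congr 1
    -- (rowT p n k).set p.length (some e[k]) = rowT (p ++ [e]) n k
    apply List.ext_getElem?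
    intro i
    simp only [List.getElem?_set, rowT, List.getElem?_map]
    by_cases hi : i < n
    · rw [List.getElem?_range hi]
      by_cases hip : p.length = i
      · subst hip
        simp only [List.length_map, List.length_range, hp, if_pos,
          Option.map_some, cellT]
        rw [List.getElem?_append_right (Nat.le_refl _)]
        simp [List.getElem?_eq_getElem hke]
      · rw [if_neg hip]
        simp only [Option.map_some, cellT]
        by_cases hlt : i < p.length
        · rw [List.getElem?_append_left hlt]
        · rw [List.getElem?_append_right (by omega)]
          have h1 : p[i]? = none := by rw [List.getElem?_eq_none (by omega)]
          have h2 : ([e] : List (List Int))[i - p.length]? = none := by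
            rw [List.getElem?_eq_none (by simp; omega)]
          simp [h1, h2]
    · have hip : p.length ≠ i := by omega
      rw [if_neg hip, List.getElem?_eq_none (l := List.range n) (by simpa using Nat.le_of_not_lt hi)]
      simp
  · rw [List.getElem?_eq_none (l := e) (by omega)]
    rw [hpad k]
    by_cases hkm : k < max (maxLen p) e.length
    · simp only [hkm, if_pos]
      congr 1
      simp only [rowT]
      apply List.map_congr_left
      intro i _
      simp only [cellT]
      by_cases hlt : i < p.length
      · rw [List.getElem?_append_left hlt]
      · by_cases hip : i = p.length
        · subst hip
          rw [List.getElem?_append_right (Nat.le_refl _)]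
          simp only [Nat.sub_self, List.getElem?_cons_zero, Option.getD_some]
          rw [List.getElem?_eq_none (l := e) (by omega)]
          have h1 : p[p.length]? = none := by simp
          rw [h1]
          simp
        · rw [List.getElem?_append_right (by omega)]
          have h1 : p[i]? = none := by rw [List.getElem?_eq_none (by omega)]
          have h2 : ([e] : List (List Int))[i - p.length]? = none := by
            rw [List.getElem?_eq_none (by simp; omega)]
          simp [h1, h2]
    · simp [hkm]

theorem goA_T (n : Nat) : ∀ (rest p : List (List Int)), p.length + rest.length ≤ n →
    goA n rest p.length (T p n) = T (p ++ rest) n := by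
  intro rest
  induction rest with
  | nil => intro p _; simp [goA]
  | cons e rs ih =>
    intro p hlen
    simp only [goA]
    rw [step_eq p e n (by simp at hlen; omega)]
    have h1 : p.length + 1 = (p ++ [e]).length := by simp
    rw [h1, ih (p ++ [e]) (by simp at hlen ⊢; omega)]
    simp

theorem transpose_list_eq_T (rows : List (List Int)) :
    transpose_list rows = T rows rows.length := by
  have h0 : T [] rows.length = [] := by simp [T, maxLen]
  have := goA_T rows.length rows [] (by simp)
  simpa [transpose_list, h0] using this

-- ===== B-side lemmas =====

theorem foldl_max_eq (l : List Nat) (a : Nat) :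
    l.foldl max a = max a (l.foldr max 0) := by
  induction l generalizing a with
  | nil => simp
  | cons b l ih =>
    simp only [List.foldl, List.foldr]
    rw [ih]
    omega

theorem maxWidth_eq_maxLen (rows : List (List Int)) : maxWidth rows = maxLen rows := by
  rw [maxWidth, foldl_max_eq, Nat.zero_max]
  induction rows with
  | nil => simp [maxLen]
  | cons r rs ih =>
    simp only [List.map_cons, List.foldr, maxLen] at ih ⊢
    omega

theorem len_le_maxLen (rows : List (List Int)) (r : List Int) (hr : r ∈ rows) :
    r.length ≤ maxLen rows := by
  induction rows with
  | nil => simp at hr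
  | cons s rs ih =>
    simp only [maxLen, List.foldr]
    rcases List.mem_cons.mp hr with h | h
    · subst h; omega
    · have := ih h
      simp only [maxLen] at this
      omega

theorem padRow_length (w : Nat) (r : List Int) (h : r.length ≤ w) :
    (padRow w r).length = w := by
  simp [padRow]
  omega

theorem padRow_get (w : Nat) (r : List Int) (j : Nat) (hr : r.length ≤ w) (hj : j < w) :
    ((padRow w r)[j]?).getD none = r[j]? := by
  simp only [padRow]
  by_cases h : j < r.length
  · rw [List.getElem?_append_left (by simpa using h), List.getElem?_map,
      List.getElem?_eq_getElem h]
    simp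
  · rw [List.getElem?_append_right (by simp; omega), List.getElem?_replicate]
    have h1 : j - r.length < w - r.length := by omega
    rw [List.getElem?_eq_none (l := r) (by omega)]
    simp [h1]

theorem zipRect_rect : ∀ (M : Nat) (rows : List (List (Option Int))), rows ≠ [] →
    (∀ r ∈ rows, r.length = M) →
    zipRect rows = (List.range M).map (fun j => rows.map (fun r => (r[j]?).getD none)) := by
  intro M
  induction M with
  | zero =>
    intro rows hne hlen
    unfold zipRect
    have hc : (rows.isEmpty || rows.any List.isEmpty) = true := by
      cases rows with
      | nil => simp
      | cons r rs =>
        have := hlen r (by simp)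
        simp [List.eq_nil_of_length_eq_zero this]
    simp [hc]
  | succ m ih =>
    intro rows hne hlen
    unfold zipRect
    have hc : (rows.isEmpty || rows.any List.isEmpty) = false := by
      simp only [Bool.or_eq_false_iff, List.isEmpty_eq_false_iff, List.any_eq_false]
      refine ⟨hne, fun r hr => ?_⟩
      have := hlen r hr
      simp [List.isEmpty_iff]
      intro h0
      subst h0
      simp at this
    rw [hc]
    simp only [Bool.false_eq_true, if_false]
    rw [ih (rows.map List.tail) (by simpa using hne)
      (by
        intro r hr
        obtain ⟨s, hs, rfl⟩ := List.mem_map.mp hr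
        have := hlen s hs
        cases s with
        | nil => simp at this
        | cons a as => simpa using this)]
    rw [List.range_succ_eq_map]
    simp only [List.map_cons, List.map_map]
    congr 1
    · apply List.map_congr_left
      intro r hr
      have := hlen r hr
      cases r with
      | nil => simp at this
      | cons a as => simp
    · apply List.map_congr_left
      intro j _
      simp only [Function.comp_apply]
      apply List.map_congr_left
      intro r hr
      have := hlen r hr
      cases r with
      | nil => simp at this
      | cons a as => simp

theorem rowT_eq_map (rows : List (List Int)) (j : Nat) :
    rows.map (fun r => r[j]?) = rowT rows rows.length j := by
  apply List.ext_getElem?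
  intro i
  simp only [rowT, List.getElem?_map]
  by_cases hi : i < rows.length
  · rw [List.getElem?_range hi, List.getElem?_eq_getElem hi]
    simp [cellT, List.getElem?_eq_getElem hi]
  · rw [List.getElem?_eq_none (l := rows) (by omega),
        List.getElem?_eq_none (l := List.range rows.length) (by simpa using Nat.le_of_not_lt hi)]
    simp

theorem alt_eq_T (rows : List (List Int)) :
    transpose_list_alt rows = T rows rows.length := by
  by_cases hne : rows = []
  · subst hne
    unfold transpose_list_alt zipRect
    simp [T, maxLen]
  · rw [transpose_list_alt,
      zipRect_rect (maxWidth rows) _ (by simpa using hne)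
        (by
          intro p hp
          obtain ⟨r, hr, rfl⟩ := List.mem_map.mp hp
          exact padRow_length _ _ (by rw [maxWidth_eq_maxLen]; exact len_le_maxLen rows r hr)),
      maxWidth_eq_maxLen]
    simp only [T]
    apply List.map_congr_left
    intro j hj
    have hjlt : j < maxLen rows := List.mem_range.mp hj
    rw [← rowT_eq_map]
    rw [List.map_map]
    apply List.map_congr_left
    intro r hr
    simp only [Function.comp_apply]
    exact padRow_get _ _ _ (len_le_maxLen rows r hr) hjlt

-- ===== VERDICT (by name: the statement is the Claim_ definition above) =====
theorem transpose_list_spec : Claim_equal_transpose_list := by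
  intro rows _
  unfold Spec_transpose_list
  rw [transpose_list_eq_T, alt_eq_T]
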